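-- pv_equiv track=rewrite | github.com/Astrocytech/Glyphser | tooling/security/security_artifact_lane_name_validator.py | _step_paths
-- ===== SOURCE A (Python) =====
-- def _step_paths(body: str) -> list[str]:
--     lines = body.splitlines()
--     in_path = False
--     out: list[str] = []
--     for raw in lines:
--         stripped = raw.strip()
--         if stripped.startswith("path:"):
--             value = stripped.split(":", 1)[1].strip()
--             if value:
--                 out.append(value)
--             in_path = True
--             continue
--         if in_path:
--             if raw.startswith(" " * 10):
--                 token = stripped
--                 if token:
--                     out.append(token)
--                 continue
--             in_path = False
--     return out
-- ===== SOURCE B (Python) =====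
-- def _step_paths(body: str) -> list[str]:
--     lines = body.splitlines()
--     n = len(lines)
--     out: list[str] = []
--     i = 0
--     while i < n:
--         stripped = lines[i].strip()
--         if stripped.startswith("path:"):
--             value = stripped.split(":", 1)[1].strip()
--             if value:
--                 out.append(value)
--             i += 1
--             # gather the indented continuation block
--             while i < n:
--                 raw = lines[i]
--                 token = raw.strip()
--                 if token.startswith("path:"):
--                     break  # new header: reprocess in the outer loop
--                 if raw.startswith(" " * 10):
--                     if token:
--                         out.append(token)
--                     i += 1
--                     continue
--                 i += 1  # non-indented terminator is consumed, block ends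
--                 break
--         else:
--             i += 1
--     return out
-- ===== Notes on version B (the rewrite author's own statement) =====
-- stated objective: alternative
-- what changed: Replaced A's single for-loop with a boolean in_path flag by an index-driven outer while loop that scans for path headers and a nested inner while loop that gathers each header's 10-space-indented continuation block (breaking back without advancing on a new header).
import Mathlib
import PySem

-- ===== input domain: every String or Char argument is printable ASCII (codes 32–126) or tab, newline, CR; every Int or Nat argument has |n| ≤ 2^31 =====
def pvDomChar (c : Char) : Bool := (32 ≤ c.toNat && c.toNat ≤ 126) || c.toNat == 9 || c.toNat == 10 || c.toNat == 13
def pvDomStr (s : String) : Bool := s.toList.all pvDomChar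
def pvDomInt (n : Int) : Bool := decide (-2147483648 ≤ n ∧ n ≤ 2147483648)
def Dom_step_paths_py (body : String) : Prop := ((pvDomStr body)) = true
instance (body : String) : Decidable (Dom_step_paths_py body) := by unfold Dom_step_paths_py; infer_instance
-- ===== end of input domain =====

-- B replaces A's flag-based state machine with an index-driven outer/inner loop
-- (header scan + nested continuation-block gatherer); objective: alternative decomposition.


-- stripped.split(":", 1)[1].strip()  (both Pythons use this exact expression; the [1]
-- is only evaluated on strings starting with "path:", where it always exists, so the
-- .getD "" defaults are unreachable there)
def pvPathValue (stripped : String) : String :=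
  PySem.Str.strip ((PySem.List.pyGet? ((PySem.Str.splitMax? stripped ":" 1).getD []) 1).getD "")

-- ===== PORT A =====
-- for-loop over splitlines with state (in_path, out), as in A
def pvStepA (st : Bool × List String) (raw : String) : Bool × List String :=
  let stripped := PySem.Str.strip raw
  if PySem.Str.startswith stripped "path:" then
    let value := pvPathValue stripped
    (true, if value ≠ "" then st.2 ++ [value] else st.2)
  else if st.1 then
    if PySem.Str.startswith raw "          " then
      (true, if stripped ≠ "" then st.2 ++ [stripped] else st.2)
    else (false, st.2)
  else st

def step_paths_py (body : String) : List String :=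
  ((PySem.Str.splitlines body).foldl pvStepA (false, [])).2

-- ===== PORT B =====
-- Source B's outer while loop (scan for a header) and inner while loop (gather the
-- indented block); the inner loop's break-on-header resumes the outer loop at the
-- same line, which is the header branch, inlined here to keep the recursion structural
mutual
def pvOuterB : List String → List String
  | [] => []
  | raw :: rest =>
    let stripped := PySem.Str.strip raw
    if PySem.Str.startswith stripped "path:" then
      let value := pvPathValue stripped
      (if value ≠ "" then [value] else []) ++ pvInnerB rest
    else pvOuterB rest

def pvInnerB : List String → List String
  | [] => []
  | raw :: rest =>
    let token := PySem.Str.strip raw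
    if PySem.Str.startswith token "path:" then
      -- break: this line is a new header (outer loop's header branch)
      let value := pvPathValue token
      (if value ≠ "" then [value] else []) ++ pvInnerB rest
    else if PySem.Str.startswith raw "          " then
      (if token ≠ "" then [token] else []) ++ pvInnerB rest
    else pvOuterB rest   -- terminator consumed, block ends
end

def step_paths_py_alt (body : String) : List String :=
  pvOuterB (PySem.Str.splitlines body)

-- ===== PRECONDITION & SPEC =====
def Spec_step_paths_py (body : String) (out : List String) : Prop := out = step_paths_py_alt body
instance (body : String) (out : List String) : Decidable (Spec_step_paths_py body out) := by unfold Spec_step_paths_py; infer_instance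

-- ===== CLAIM (what is proved, stated in full; the proofs are below) =====
def Claim_equal_step_paths_py : Prop := ∀ (body : String), Dom_step_paths_py body → Spec_step_paths_py body (step_paths_py body)

-- ===== LEMMAS AND PROOFS =====

-- loop invariant: A's fold from (flag, acc) produces acc followed by B's result,
-- where flag = true corresponds to being inside B's inner (block-gathering) loop
theorem pvLoopEq (lines : List String) : ∀ (flag : Bool) (acc : List String),
    (lines.foldl pvStepA (flag, acc)).2
      = acc ++ (if flag then pvInnerB lines else pvOuterB lines) := by
  induction lines with
  | nil => intro flag acc; cases flag <;> simp [pvOuterB, pvInnerB]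
  | cons raw rest ih =>
    intro flag acc
    cases flag <;>
      simp only [List.foldl_cons, pvStepA, pvOuterB, pvInnerB, if_true] <;>
      split_ifs <;>
      simp [ih, List.append_assoc]

-- ===== VERDICT (by name: the statement is the Claim_ definition above) =====
theorem step_paths_py_spec : Claim_equal_step_paths_py := by
  intro body _
  unfold Spec_step_paths_py step_paths_py step_paths_py_alt
  simpa using pvLoopEq (PySem.Str.splitlines body) false []
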